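-- pv_equiv track=rewrite | github.com/malkro7/aoc2025 | aoc9b.py | build_border_rows
-- ===== SOURCE A (Python) =====
-- from typing import List, Tuple
--
-- Coord = Tuple[int, int]
--
-- def build_border_rows(red_tiles: List[Coord]):
--     border_rows = {}
--     n = len(red_tiles)
--
--     for i in range(n):
--         x1,y1 = red_tiles[i]
--         x2,y2 = red_tiles[(i+1)%n]   # wrap
--
--         if y1 == y2:
--             # horizontal edge
--             row = y1
--             a,b = sorted((x1,x2))
--             for x in range(a,b+1):
--                 border_rows.setdefault(row, []).append(x)
--
--         elif x1 == x2:
--             # vertical edge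
--             col = x1
--             a,b = sorted((y1,y2))
--             for y in range(a,b+1):
--                 border_rows.setdefault(y, []).append(col)
--
--         else:
--             raise ValueError("Red tile sequence must be axis aligned")
--
--     # dedupe and sort
--     for y in border_rows:
--         border_rows[y] = sorted(set(border_rows[y]))
--
--     return border_rows
-- ===== SOURCE B (Python) =====
-- def build_border_rows(red_tiles):
--     n = len(red_tiles)
--     # pass 1: compress each edge into (row, lo, hi) x-interval segments
--     segs = []
--     for i in range(n):
--         x1, y1 = red_tiles[i]
--         x2, y2 = red_tiles[(i + 1) % n]
--         if y1 == y2: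
--             segs.append((y1, min(x1, x2), max(x1, x2)))
--         elif x1 == x2:
--             segs.extend((y, x1, x1) for y in range(min(y1, y2), max(y1, y2) + 1))
--         else:
--             raise ValueError("Red tile sequence must be axis aligned")
--     # pass 2: group the interval segments by row (first-seen order)
--     rows = {}
--     for y, lo, hi in segs:
--         rows.setdefault(y, []).append((lo, hi))
--     # pass 3: per row, scan the covered span once; dedup is a coverage test, no sets, no sort
--     out = {}
--     for y, ivs in rows.items():
--         a = min(lo for lo, _ in ivs)
--         b = max(hi for _, hi in ivs)
--         out[y] = [x for x in range(a, b + 1) if any(lo <= x <= hi for lo, hi in ivs)]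
--     return out
-- ===== Notes on version B (the rewrite author's own statement) =====
-- stated objective: alternative
-- what changed: A rasterizes every edge into individual border cells bucketed into a dict-of-lists and rewrites each bucket with sorted(set(...)); B compresses each edge into (row, lo, hi) x-interval segments (one tuple per horizontal edge), groups the segments by row, and produces each row's cells by a single left-to-right scan of the row's covered span with an interval-coverage test - no sets and no sorting anywhere.
import Mathlib
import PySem

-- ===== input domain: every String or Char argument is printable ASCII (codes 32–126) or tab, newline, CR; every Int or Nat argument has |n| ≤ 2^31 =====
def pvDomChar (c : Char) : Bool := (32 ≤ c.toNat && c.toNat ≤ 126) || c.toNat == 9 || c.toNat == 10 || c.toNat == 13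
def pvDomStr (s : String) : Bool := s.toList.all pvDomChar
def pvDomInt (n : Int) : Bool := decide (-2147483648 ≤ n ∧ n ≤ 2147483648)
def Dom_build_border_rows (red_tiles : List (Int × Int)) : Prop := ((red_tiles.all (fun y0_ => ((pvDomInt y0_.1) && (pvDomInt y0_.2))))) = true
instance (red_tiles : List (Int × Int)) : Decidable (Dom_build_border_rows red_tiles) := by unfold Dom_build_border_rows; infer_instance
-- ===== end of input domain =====

-- B compresses each edge into (row, lo, hi) x-interval segments, groups the segments by row,
-- and emits each row by one scan of its covered span with an interval-coverage test — no sets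
-- and no sorting, against A's per-cell bucketing plus sorted(set(...)) (objective: alternative).

-- ===== PORT A =====
def build_border_rows (red_tiles : List (Int × Int)) : List (Int × List Int) :=
  let n : Int := red_tiles.length
  let border_rows : PySem.Dict Int (List Int) :=
    (PySem.List.pyRange 0 n 1).foldl (fun d i =>
      let p1 := PySem.List.pyGetD red_tiles i (0, 0)
      let p2 := PySem.List.pyGetD red_tiles (PySem.Int.mod (i + 1) n) (0, 0)
      if p1.2 = p2.2 then
        -- horizontal edge: a,b = sorted((x1,x2)); append x to row y1 for x in range(a,b+1)
        (PySem.List.pyRange (min p1.1 p2.1) (max p1.1 p2.1 + 1) 1).foldl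
          (fun d x => d.modify p1.2 [] (fun l => l ++ [x])) d
      else if p1.1 = p2.1 then
        -- vertical edge: a,b = sorted((y1,y2)); append col x1 to row y for y in range(a,b+1)
        (PySem.List.pyRange (min p1.2 p2.2) (max p1.2 p2.2 + 1) 1).foldl
          (fun d y => d.modify y [] (fun l => l ++ [p1.1])) d
      else d  -- Python: raise ValueError — these inputs are excluded by Pre_
    ) PySem.Dict.empty
  -- dedupe and sort: border_rows[y] = sorted(set(border_rows[y]))
  border_rows.items.map (fun p => (p.1, PySem.List.sorted (PySem.Set.ofList p.2) (fun x => x) false))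

-- ===== PORT B =====
def build_border_rows_alt (red_tiles : List (Int × Int)) : List (Int × List Int) :=
  let n : Int := red_tiles.length
  -- pass 1: compress each edge into (row, lo, hi) x-interval segments
  let segs : List (Int × Int × Int) :=
    (PySem.List.pyRange 0 n 1).foldl (fun ss i =>
      let p1 := PySem.List.pyGetD red_tiles i (0, 0)
      let p2 := PySem.List.pyGetD red_tiles (PySem.Int.mod (i + 1) n) (0, 0)
      if p1.2 = p2.2 then
        ss ++ [(p1.2, min p1.1 p2.1, max p1.1 p2.1)]
      else if p1.1 = p2.1 then
        ss ++ (PySem.List.pyRange (min p1.2 p2.2) (max p1.2 p2.2 + 1) 1).map (fun y => (y, p1.1, p1.1))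
      else ss  -- Python: raise ValueError — these inputs are excluded by Pre_
    ) []
  -- pass 2: group the interval segments by row (first-seen order)
  let rows : PySem.Dict Int (List (Int × Int)) :=
    segs.foldl (fun d s => d.modify s.1 [] (fun l => l ++ [s.2])) PySem.Dict.empty
  -- pass 3: per row, scan the covered span once; dedup is a coverage test
  -- (min/max over a generator: each ivs is nonempty in every reachable call, .getD 0 is never used)
  let out : PySem.Dict Int (List Int) :=
    rows.items.foldl (fun o p =>
      let a := (PySem.List.min? (p.2.map (fun iv => iv.1)) (fun x => x)).getD 0
      let b := (PySem.List.max? (p.2.map (fun iv => iv.2)) (fun x => x)).getD 0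
      o.insert p.1 ((PySem.List.pyRange a (b + 1) 1).filter
        (fun x => p.2.any (fun iv => iv.1 ≤ x && x ≤ iv.2)))) PySem.Dict.empty
  out.items

-- ===== PRECONDITION & SPEC =====
-- Pre_ excludes exactly the inputs where some consecutive pair (with wrap-around) is not
-- axis-aligned: there Python A (and Python B) raise ValueError.
def Pre_build_border_rows (red_tiles : List (Int × Int)) : Prop :=
  ∀ p ∈ red_tiles.zip (red_tiles.rotate 1), p.1.1 = p.2.1 ∨ p.1.2 = p.2.2
instance (red_tiles : List (Int × Int)) : Decidable (Pre_build_border_rows red_tiles) := by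
  unfold Pre_build_border_rows; infer_instance

def pvWitness_build_border_rows : (List (Int × Int)) := [(0, 0), (2, 0), (2, 1), (0, 1)]

def Spec_build_border_rows (red_tiles : List (Int × Int)) (out : List (Int × List Int)) : Prop := out = build_border_rows_alt red_tiles
instance (red_tiles : List (Int × Int)) (out : List (Int × List Int)) : Decidable (Spec_build_border_rows red_tiles out) := by unfold Spec_build_border_rows; infer_instance

-- ===== CLAIM (what is proved, stated in full; the proofs are below) =====
def Claim_equal_build_border_rows : Prop := ∀ (red_tiles : List (Int × Int)), Dom_build_border_rows red_tiles → Pre_build_border_rows red_tiles → Spec_build_border_rows red_tiles (build_border_rows red_tiles)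

-- ===== LEMMAS AND PROOFS =====

-- the (row, lo, hi) segments of edge i, as B emits them
def pvEdgeSegs (red_tiles : List (Int × Int)) (i : Int) : List (Int × Int × Int) :=
  let p1 := PySem.List.pyGetD red_tiles i (0, 0)
  let p2 := PySem.List.pyGetD red_tiles (PySem.Int.mod (i + 1) (red_tiles.length : Int)) (0, 0)
  if p1.2 = p2.2 then [(p1.2, min p1.1 p2.1, max p1.1 p2.1)]
  else if p1.1 = p2.1 then
    (PySem.List.pyRange (min p1.2 p2.2) (max p1.2 p2.2 + 1) 1).map (fun y => (y, p1.1, p1.1))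
  else []

-- B's first loop (definitionally the `segs` of build_border_rows_alt once the edge body is unfolded)
def pvSegs (red_tiles : List (Int × Int)) : List (Int × Int × Int) :=
  (PySem.List.pyRange 0 (red_tiles.length : Int) 1).foldl
    (fun ss i => ss ++ pvEdgeSegs red_tiles i) []

-- the cells a segment stands for
def pvExpand (s : Int × Int × Int) : List (Int × Int) :=
  (PySem.List.pyRange s.2.1 (s.2.2 + 1) 1).map (fun x => (s.1, x))

def pvCells (red_tiles : List (Int × Int)) : List (Int × Int) :=
  (pvSegs red_tiles).flatMap pvExpand

-- A's edge loop verbatim (definitionally the `border_rows` of build_border_rows)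
def pvAfold (red_tiles : List (Int × Int)) : PySem.Dict Int (List Int) :=
  (PySem.List.pyRange 0 (red_tiles.length : Int) 1).foldl (fun d i =>
    let p1 := PySem.List.pyGetD red_tiles i (0, 0)
    let p2 := PySem.List.pyGetD red_tiles (PySem.Int.mod (i + 1) (red_tiles.length : Int)) (0, 0)
    if p1.2 = p2.2 then
      (PySem.List.pyRange (min p1.1 p2.1) (max p1.1 p2.1 + 1) 1).foldl
        (fun d x => d.modify p1.2 [] (fun l => l ++ [x])) d
    else if p1.1 = p2.1 then
      (PySem.List.pyRange (min p1.2 p2.2) (max p1.2 p2.2 + 1) 1).foldl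
        (fun d y => d.modify y [] (fun l => l ++ [p1.1])) d
    else d) PySem.Dict.empty

-- A's edge body is the cell-at-a-time grouping fold over that edge's expanded segments
lemma pvA_body_eq (red_tiles : List (Int × Int)) (d : PySem.Dict Int (List Int)) (i : Int) :
    (let p1 := PySem.List.pyGetD red_tiles i (0, 0)
     let p2 := PySem.List.pyGetD red_tiles (PySem.Int.mod (i + 1) (red_tiles.length : Int)) (0, 0)
     if p1.2 = p2.2 then
       (PySem.List.pyRange (min p1.1 p2.1) (max p1.1 p2.1 + 1) 1).foldl
         (fun d x => d.modify p1.2 [] (fun l => l ++ [x])) d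
     else if p1.1 = p2.1 then
       (PySem.List.pyRange (min p1.2 p2.2) (max p1.2 p2.2 + 1) 1).foldl
         (fun d y => d.modify y [] (fun l => l ++ [p1.1])) d
     else d) =
    ((pvEdgeSegs red_tiles i).flatMap pvExpand).foldl
      (fun d p => d.modify p.1 [] (fun l => l ++ [p.2])) d := by
  simp only [pvEdgeSegs]
  split_ifs <;>
    simp [pvExpand, List.foldl_map, List.flatMap_map, List.foldl_flatMap]

-- collect-then-fold = fold-edge-by-edge (generic)
lemma pv_foldl_concat_foldl {α β γ : Type} (E : γ → List α) (g : β → α → β) :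
    ∀ (L : List γ) (cs : List α) (d : β),
      ((L.foldl (fun cs i => cs ++ E i) cs).foldl g d) =
        L.foldl (fun d i => (E i).foldl g d) (cs.foldl g d) := by
  intro L
  induction L with
  | nil => intro cs d; rfl
  | cons i L ih =>
    intro cs d
    simp only [List.foldl_cons, ih, List.foldl_append]

lemma pv_foldl_concat_nil {α β γ : Type} (E : γ → List α) (g : β → α → β) (L : List γ) (d : β) :
    ((L.foldl (fun cs i => cs ++ E i) []).foldl g d) =
      L.foldl (fun d i => (E i).foldl g d) d := by
  simpa using pv_foldl_concat_foldl E g L [] d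

lemma pvAfold_eq (red_tiles : List (Int × Int)) :
    pvAfold red_tiles =
      (pvCells red_tiles).foldl (fun d p => d.modify p.1 [] (fun l => l ++ [p.2]))
        PySem.Dict.empty := by
  unfold pvCells pvSegs pvAfold
  rw [List.foldl_flatMap, pv_foldl_concat_nil]
  apply PySem.List.foldl_congr_mem
  intro d i _
  rw [pvA_body_eq red_tiles d i, List.foldl_flatMap]

-- every segment has lo ≤ hi (its cell list is nonempty)
lemma pvSegs_lo_le_hi (red_tiles : List (Int × Int)) :
    ∀ s ∈ pvSegs red_tiles, s.2.1 ≤ s.2.2 := by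
  have h : ∀ (L : List Int) (acc : List (Int × Int × Int)),
      (∀ s ∈ acc, s.2.1 ≤ s.2.2) →
      ∀ s ∈ L.foldl (fun ss i => ss ++ pvEdgeSegs red_tiles i) acc, s.2.1 ≤ s.2.2 := by
    intro L
    induction L with
    | nil => intro acc hacc; exact hacc
    | cons i L ih =>
      intro acc hacc
      apply ih
      intro s hs
      rcases List.mem_append.mp hs with h1 | h2
      · exact hacc s h1
      · simp only [pvEdgeSegs] at h2
        split_ifs at h2
        · simp only [List.mem_singleton] at h2
          subst h2
          exact min_le_max
        · simp only [List.mem_map] at h2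
          obtain ⟨y, -, h2⟩ := h2
          subst h2
          simp
        · simp at h2
  exact h _ [] (by simp)

-- a nonempty constant-valued block folds into a single Set.add
lemma pv_foldl_add_const (y : Int) :
    ∀ (m : List Int) (acc : PySem.Set Int), m ≠ [] → (∀ z ∈ m, z = y) →
      m.foldl PySem.Set.add acc = PySem.Set.add acc y := by
  have habs : ∀ (t : List Int) (acc : PySem.Set Int), y ∈ acc → (∀ z ∈ t, z = y) →
      t.foldl PySem.Set.add acc = acc := by
    intro t
    induction t with
    | nil => intro acc _ _; rfl
    | cons z t ih =>
      intro acc hy hall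
      have hz : z = y := hall z (by simp)
      have : PySem.Set.add acc z = acc := by
        simp [PySem.Set.add, PySem.Set.contains, hz, hy]
      simp only [List.foldl_cons, this]
      exact ih acc hy (fun w hw => hall w (by simp [hw]))
  intro m acc hne hall
  cases m with
  | nil => exact absurd rfl hne
  | cons z t =>
    have hz : z = y := hall z (by simp)
    simp only [List.foldl_cons, hz]
    exact habs t _ ((PySem.Set.mem_add acc y y).mpr (Or.inr rfl))
      (fun w hw => hall w (by simp [hw]))

-- set of a flatMap of nonempty constant-keyed blocks = set of the keys
lemma pv_ofList_flatMap {σ : Type} (l : List σ) (F : σ → List Int) (k : σ → Int)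
    (h : ∀ s ∈ l, F s ≠ [] ∧ ∀ z ∈ F s, z = k s) :
    PySem.Set.ofList (l.flatMap F) = PySem.Set.ofList (l.map k) := by
  rw [PySem.Set.ofList_eq_foldl, PySem.Set.ofList_eq_foldl]
  have aux : ∀ (l : List σ) (acc : PySem.Set Int),
      (∀ s ∈ l, F s ≠ [] ∧ ∀ z ∈ F s, z = k s) →
      (l.flatMap F).foldl PySem.Set.add acc = (l.map k).foldl PySem.Set.add acc := by
    intro l
    induction l with
    | nil => intro acc _; rfl
    | cons s l ih =>
      intro acc hl
      obtain ⟨hne, hconst⟩ := hl s (by simp)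
      simp only [List.flatMap_cons, List.map_cons, List.foldl_append, List.foldl_cons]
      rw [pv_foldl_add_const (k s) (F s) acc hne hconst]
      exact ih _ (fun t ht => hl t (by simp [ht]))
  exact aux l [] h

lemma pvRange_pairwise (a b : Int) : (PySem.List.pyRange a b 1).Pairwise (· < ·) := by
  rw [PySem.List.pyRange_of_pos a b (by norm_num)]
  refine List.Pairwise.map _ ?_ (List.pairwise_lt_range)
  intro i j hij
  omega

-- the per-row value: sorted(set(cells of row y)) = the coverage scan over the row's segments
lemma pv_row_value (segs : List (Int × Int × Int)) (y : Int)
    (hy : y ∈ segs.map (fun s => s.1)) :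
    PySem.List.sorted
      (PySem.Set.ofList
        (((segs.flatMap pvExpand).filter (fun c => c.1 == y)).map (fun c => c.2)))
      (fun x => x) false =
    (let ivs := (segs.filter (fun s => s.1 == y)).map (fun s => s.2)
     let a := (PySem.List.min? (ivs.map (fun iv => iv.1)) (fun x => x)).getD 0
     let b := (PySem.List.max? (ivs.map (fun iv => iv.2)) (fun x => x)).getD 0
     (PySem.List.pyRange a (b + 1) 1).filter
       (fun x => ivs.any (fun iv => iv.1 ≤ x && x ≤ iv.2))) := by
  set ivs := (segs.filter (fun s => s.1 == y)).map (fun s => s.2) with hivs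
  have hne : ivs ≠ [] := by
    obtain ⟨s, hs, hsy⟩ := List.mem_map.mp hy
    have : s.2 ∈ ivs := by
      rw [hivs]
      exact List.mem_map_of_mem (List.mem_filter.mpr ⟨hs, by simp [hsy]⟩)
    intro h0; rw [h0] at this; exact (List.not_mem_nil) this
  obtain ⟨a, ha⟩ : ∃ a, PySem.List.min? (ivs.map (fun iv => iv.1)) (fun x => x) = some a := by
    cases hm : PySem.List.min? (ivs.map (fun iv => iv.1)) (fun x => x) with
    | none =>
      rw [PySem.List.min?_eq_none_iff] at hm
      exact absurd (List.map_eq_nil_iff.mp hm) hne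
    | some a => exact ⟨a, rfl⟩
  obtain ⟨b, hb⟩ : ∃ b, PySem.List.max? (ivs.map (fun iv => iv.2)) (fun x => x) = some b := by
    cases hm : PySem.List.max? (ivs.map (fun iv => iv.2)) (fun x => x) with
    | none =>
      rw [PySem.List.max?_eq_none_iff] at hm
      exact absurd (List.map_eq_nil_iff.mp hm) hne
    | some b => exact ⟨b, rfl⟩
  have hamin : ∀ iv ∈ ivs, a ≤ iv.1 := fun iv hiv =>
    PySem.List.min?_isMin ha iv.1 (List.mem_map_of_mem hiv)
  have hbmax : ∀ iv ∈ ivs, iv.2 ≤ b := fun iv hiv =>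
    PySem.List.max?_isMax hb iv.2 (List.mem_map_of_mem hiv)
  simp only [ha, hb, Option.getD_some]
  -- the scan list is strictly increasing …
  have hpw : ((PySem.List.pyRange a (b + 1) 1).filter
      (fun x => ivs.any (fun iv => iv.1 ≤ x && x ≤ iv.2))).Pairwise (· < ·) :=
    (pvRange_pairwise a (b + 1)).filter _
  -- … and has the same members as set(cells of row y)
  apply PySem.List.sorted_eq_of_perm_of_pairwise_lt
  · rw [List.perm_ext_iff_of_nodup ((hpw.imp (fun h => ne_of_lt h)))
      (PySem.Set.nodup_ofList _)]
    intro x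
    rw [PySem.Set.mem_ofList]
    constructor
    · intro hx
      have hx' := List.mem_filter.mp hx
      obtain ⟨iv, hiv, hcov⟩ := List.any_eq_true.mp hx'.2
      have hcov' : iv.1 ≤ x ∧ x ≤ iv.2 := by simpa using hcov
      simp only [List.mem_map, List.mem_filter, List.mem_flatMap, pvExpand,
        PySem.List.mem_pyRange_one, beq_iff_eq]
      obtain ⟨s, hs, hsiv⟩ := List.mem_map.mp (by rw [hivs] at hiv; exact hiv)
      have hs' := List.mem_filter.mp hs
      have hsiv' : s.2 = iv := hsiv
      refine ⟨(y, x), ⟨⟨s, hs'.1, ?_⟩, rfl⟩, rfl⟩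
      refine ⟨x, ⟨?_, ?_⟩, ?_⟩
      · rw [hsiv']; exact hcov'.1
      · rw [hsiv']; omega
      · have hs1 : s.1 = y := by simpa using hs'.2
        rw [hs1]
    · intro hx
      simp only [List.mem_map, List.mem_filter, List.mem_flatMap, pvExpand,
        beq_iff_eq] at hx
      obtain ⟨c, ⟨⟨s, hs, hcs⟩, hcy⟩, hcx⟩ := hx
      obtain ⟨x', hx', hcx'⟩ := hcs
      rw [PySem.List.mem_pyRange_one] at hx'
      have hc1 : c.1 = s.1 := by rw [← hcx']
      have hc2 : c.2 = x' := by rw [← hcx']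
      have hsy : s.1 = y := by rw [← hc1, hcy]
      have hiv : s.2 ∈ ivs := by
        rw [hivs]
        exact List.mem_map_of_mem (List.mem_filter.mpr ⟨hs, by simp [hsy]⟩)
      have hxx : x = x' := by rw [← hcx, hc2]
      apply List.mem_filter.mpr
      constructor
      · rw [PySem.List.mem_pyRange_one]
        have := hamin s.2 hiv
        have := hbmax s.2 hiv
        omega
      · apply List.any_eq_true.mpr
        exact ⟨s.2, hiv, by simp; omega⟩
  · exact hpw

-- ===== VERDICT (by name: the statement is the Claim_ definition above) =====
theorem build_border_rows_spec : Claim_equal_build_border_rows := by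
  intro red_tiles _ _
  unfold Spec_build_border_rows
  show build_border_rows red_tiles = build_border_rows_alt red_tiles
  -- name the verbatim pieces of both ports
  have hA : build_border_rows red_tiles =
      (pvAfold red_tiles).items.map
        (fun p => (p.1, PySem.List.sorted (PySem.Set.ofList p.2) (fun x => x) false)) := rfl
  -- B's first loop verbatim, then identified with pvSegs
  set segs0 : List (Int × Int × Int) :=
    (PySem.List.pyRange 0 (red_tiles.length : Int) 1).foldl (fun ss i =>
      let p1 := PySem.List.pyGetD red_tiles i (0, 0)
      let p2 := PySem.List.pyGetD red_tiles (PySem.Int.mod (i + 1) (red_tiles.length : Int)) (0, 0)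
      if p1.2 = p2.2 then
        ss ++ [(p1.2, min p1.1 p2.1, max p1.1 p2.1)]
      else if p1.1 = p2.1 then
        ss ++ (PySem.List.pyRange (min p1.2 p2.2) (max p1.2 p2.2 + 1) 1).map (fun y => (y, p1.1, p1.1))
      else ss) [] with hsegs0
  have hsegs : segs0 = pvSegs red_tiles := by
    rw [hsegs0]
    unfold pvSegs
    apply PySem.List.foldl_congr_mem
    intro ss i _
    simp only [pvEdgeSegs]
    split_ifs <;> simp
  set rows : PySem.Dict Int (List (Int × Int)) :=
    segs0.foldl (fun d s => d.modify s.1 [] (fun l => l ++ [s.2]))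
      PySem.Dict.empty with hrows
  have hB : build_border_rows_alt red_tiles =
      (rows.items.foldl (fun o p =>
        o.insert p.1
          ((PySem.List.pyRange
              ((PySem.List.min? (p.2.map (fun iv => iv.1)) (fun x => x)).getD 0)
              ((PySem.List.max? (p.2.map (fun iv => iv.2)) (fun x => x)).getD 0 + 1) 1).filter
            (fun x => p.2.any (fun iv => iv.1 ≤ x && x ≤ iv.2)))) PySem.Dict.empty).items := rfl
  -- keys of both groupings
  have hAkeys : (pvAfold red_tiles).keys = PySem.Set.ofList ((pvCells red_tiles).map (fun c => c.1)) := by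
    rw [pvAfold_eq,
      PySem.Dict.keys_foldl_modify_key (pvCells red_tiles) (fun c => c.1) []
        (fun _ p => fun l => l ++ [p.2]) PySem.Dict.empty,
      PySem.Dict.keys_empty, PySem.Set.update_nil_left]
  have hRkeys : rows.keys = PySem.Set.ofList ((pvSegs red_tiles).map (fun s => s.1)) := by
    rw [hrows, hsegs,
      PySem.Dict.keys_foldl_modify_key (pvSegs red_tiles) (fun s => s.1) []
        (fun _ s => fun l => l ++ [s.2]) PySem.Dict.empty,
      PySem.Dict.keys_empty, PySem.Set.update_nil_left]
  have hAnd : (pvAfold red_tiles).keys.Nodup := by rw [hAkeys]; exact PySem.Set.nodup_ofList _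
  have hRnd : rows.keys.Nodup := by rw [hRkeys]; exact PySem.Set.nodup_ofList _
  -- the two key lists coincide (each segment expands to a nonempty constant-row block)
  have hkeyeq : PySem.Set.ofList ((pvCells red_tiles).map (fun c => c.1)) =
      PySem.Set.ofList ((pvSegs red_tiles).map (fun s => s.1)) := by
    unfold pvCells
    rw [List.map_flatMap]
    apply pv_ofList_flatMap
    intro s hs
    constructor
    · have hlh := pvSegs_lo_le_hi red_tiles s hs
      have : s.2.1 ∈ PySem.List.pyRange s.2.1 (s.2.2 + 1) 1 :=
        PySem.List.mem_pyRange_one.mpr ⟨le_refl _, by omega⟩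
      intro h0
      have h1 : (PySem.List.pyRange s.2.1 (s.2.2 + 1) 1).length = 0 := by
        simpa [pvExpand] using congrArg List.length h0
      rw [List.length_eq_zero_iff.mp h1] at this
      exact (List.not_mem_nil) this
    · intro z hz
      simp only [pvExpand, List.map_map, List.mem_map] at hz
      obtain ⟨x, -, hx⟩ := hz
      simpa using hx.symm
  -- B's output dict: fresh distinct keys, so items = map over rows.items
  have hfresh : ∀ p ∈ rows.items, (PySem.Dict.empty : PySem.Dict Int (List Int)).contains p.1 = false :=
    fun p _ => PySem.Dict.contains_empty p.1
  have hknd : (rows.items.map (fun p => p.1)).Nodup := hRnd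
  rw [hA, hB,
    PySem.Dict.items_foldl_insert_fresh rows.items (fun p => p.1) _ PySem.Dict.empty hfresh hknd,
    PySem.Dict.items_eq_map_keys _ hAnd [], PySem.Dict.items_eq_map_keys rows hRnd []]
  simp only [List.map_map]
  rw [hAkeys, hRkeys, hkeyeq]
  apply List.map_congr_left
  intro y hy
  have hy' : y ∈ (pvSegs red_tiles).map (fun s => s.1) := (PySem.Set.mem_ofList _ y).mp hy
  -- values at key y
  have hAval : (pvAfold red_tiles).getD y [] =
      (((pvCells red_tiles).filter (fun c => c.1 == y)).map (fun c => c.2)) := by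
    rw [pvAfold_eq, PySem.Dict.getD_foldl_modify_append, PySem.Dict.getD_empty]
    simp
  have hRval : rows.getD y [] =
      (((pvSegs red_tiles).filter (fun s => s.1 == y)).map (fun s => s.2)) := by
    rw [hrows, hsegs, PySem.Dict.getD_foldl_modify_append, PySem.Dict.getD_empty]
    simp
  simp only [Function.comp_apply, hAval, hRval]
  have hv := pv_row_value (pvSegs red_tiles) y hy'
  rw [Prod.mk.injEq]
  refine ⟨rfl, ?_⟩
  unfold pvCells
  exact hv
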